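-- pv_equiv track=rewrite | github.com/sefinehtesfa34/competetive_programming- | temp.py | findDataLocations
-- ===== SOURCE A (Python) =====
-- def findDataLocations(locations, movedFrom, movedTo):
--     hashmap = {}
--     answer = []
--     for move_from, move_to in zip(movedFrom, movedTo):
--         hashmap[move_from] = move_to
--     for val in locations:
--         visited = set()
--         while val in hashmap and val not in visited:
--             visited.add(val)
--             val = hashmap[val]
--         answer.append(val)
--     return sorted(answer)
-- ===== SOURCE B (Python) =====
-- def findDataLocations(locations, movedFrom, movedTo):
--     dest = dict(zip(movedFrom, movedTo))
--     cache = {}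
--
--     def resolve(v):
--         path = []
--         pos = {}
--         while v in dest and v not in cache and v not in pos:
--             pos[v] = len(path)
--             path.append(v)
--             v = dest[v]
--         if v in cache:
--             e = cache[v]
--             for u in path:
--                 cache[u] = e
--             return e
--         if v in pos:
--             i = pos[v]
--             for u in path[:i]:
--                 cache[u] = v
--             for u in path[i:]:
--                 cache[u] = u
--             return v
--         for u in path:
--             cache[u] = v
--         return v
--
--     return sorted(resolve(v) for v in locations)
-- ===== Notes on version B (the rewrite author's own statement) =====
-- stated objective: alternative
-- what changed: B replaces A's independent per-location visited-set walks by memoized chain resolution: a single cache maps every node already followed to its endpoint (terminal node, cycle entry for nodes feeding a cycle, the node itself on a cycle), so each move-map key is resolved at most once across all locations.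
import Mathlib
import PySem

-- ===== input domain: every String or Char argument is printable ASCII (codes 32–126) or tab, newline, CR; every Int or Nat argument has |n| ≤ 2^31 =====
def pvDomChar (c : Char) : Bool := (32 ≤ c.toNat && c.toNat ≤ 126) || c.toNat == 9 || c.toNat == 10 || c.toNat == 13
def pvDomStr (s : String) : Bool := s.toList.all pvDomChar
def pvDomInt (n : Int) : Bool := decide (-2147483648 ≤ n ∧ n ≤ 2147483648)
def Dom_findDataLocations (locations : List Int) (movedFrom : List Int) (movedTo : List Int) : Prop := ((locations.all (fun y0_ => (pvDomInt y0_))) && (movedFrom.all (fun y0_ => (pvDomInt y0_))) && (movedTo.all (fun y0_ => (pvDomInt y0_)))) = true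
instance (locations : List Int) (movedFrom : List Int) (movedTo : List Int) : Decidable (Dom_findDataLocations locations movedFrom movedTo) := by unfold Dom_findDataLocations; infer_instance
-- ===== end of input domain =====

-- B replaces A's independent per-location visited-set walks by memoized chain
-- resolution: a cache maps every already-followed node to its endpoint (alternative
-- algorithm; same return value).

-- ===== PORT A =====

-- termination helper for A's while loop: each iteration visits a fresh key of the map
theorem pvWalkA_measure {m : PySem.Dict Int Int} {visited : PySem.Set Int} {val nxt : Int}
    (h : m.get? val = some nxt) (hv : ¬ visited.contains val = true) :
    (m.items.filter (fun p => !(visited.add val).contains p.1)).length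
      < (m.items.filter (fun p => !visited.contains p.1)).length := by
  have hval_notmem : val ∉ visited := by
    intro hmem; exact hv ((PySem.Set.contains_iff visited val).mpr hmem)
  have hadd : visited.add val = visited ++ [val] := PySem.Set.add_of_not_mem hval_notmem
  have hmem : (val, nxt) ∈ m.items := PySem.Dict.mem_items_of_get?_eq_some m h
  have heq : m.items.filter (fun p => !(visited ++ [val]).contains p.1)
      = (m.items.filter (fun p => !visited.contains p.1)).filter (fun p => !(p.1 == val)) := by
    rw [List.filter_filter]
    apply List.filter_congr
    intro p _
    cases hpv : (p.1 == val) <;> cases hc : visited.contains p.1 <;>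
      simp_all [List.contains_eq_mem]
  rw [hadd, heq]
  apply List.length_filter_lt_length_iff_exists.mpr
  refine ⟨(val, nxt), List.mem_filter.mpr ⟨hmem, by simpa using hval_notmem⟩, by simp⟩

-- A's inner while loop: follow the chain, tracking visited keys in a set
def walkA (m : PySem.Dict Int Int) (visited : PySem.Set Int) (val : Int) : Int :=
  match _h : m.get? val with
  | none => val
  | some nxt =>
    if _hv : visited.contains val = true then val
    else walkA m (visited.add val) nxt
termination_by (m.items.filter (fun p => !visited.contains p.1)).length
decreasing_by exact pvWalkA_measure _h _hv

def findDataLocations (locations : List Int) (movedFrom : List Int) (movedTo : List Int) : List Int :=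
  let hashmap := (movedFrom.zip movedTo).foldl (fun d p => d.insert p.1 p.2) PySem.Dict.empty
  let answer := locations.foldl (fun acc val => acc ++ [walkA hashmap PySem.Set.empty val]) ([] : List Int)
  PySem.List.sorted answer (fun x => x) false

-- ===== PORT B =====

-- termination helper for B's resolve loop: each iteration records a fresh key in pos
theorem pvResolveLoop_measure {m cache pos : PySem.Dict Int Int} {path : List Int} {v w : Int}
    (h : m.get? v = some w) (hc : ¬ (cache.contains v || pos.contains v) = true) :
    (m.items.filter
        (fun p => !(cache.contains p.1 || (pos.insert v (path.length : Int)).contains p.1))).length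
      < (m.items.filter (fun p => !(cache.contains p.1 || pos.contains p.1))).length := by
  have hcv : cache.contains v = false := by
    cases hx : cache.contains v <;> simp_all
  have hpv : pos.contains v = false := by
    cases hx : pos.contains v <;> simp_all
  have hmem : (v, w) ∈ m.items := PySem.Dict.mem_items_of_get?_eq_some m h
  have heq : m.items.filter
        (fun p => !(cache.contains p.1 || (pos.insert v (path.length : Int)).contains p.1))
      = (m.items.filter (fun p => !(cache.contains p.1 || pos.contains p.1))).filter
          (fun p => !(p.1 == v)) := by
    rw [List.filter_filter]
    apply List.filter_congr
    intro p _
    rw [PySem.Dict.contains_insert]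
    cases hpc : (p.1 == v) <;> cases h1 : cache.contains p.1 <;> cases h2 : pos.contains p.1 <;>
      simp_all
  rw [heq]
  apply List.length_filter_lt_length_iff_exists.mpr
  refine ⟨(v, w), List.mem_filter.mpr ⟨hmem, by simp [hcv, hpv]⟩, by simp⟩

-- B's while loop: follow the chain until it leaves the map, hits the cache,
-- or closes a cycle; record each followed key's position on the path
def resolveLoop (m cache pos : PySem.Dict Int Int) (path : List Int) (v : Int) :
    PySem.Dict Int Int × List Int × Int :=
  match _h : m.get? v with
  | none => (pos, path, v)
  | some w =>
    if _hc : (cache.contains v || pos.contains v) = true then (pos, path, v)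
    else resolveLoop m cache (pos.insert v (path.length : Int)) (path ++ [v]) w
termination_by (m.items.filter (fun p => !(cache.contains p.1 || pos.contains p.1))).length
decreasing_by exact pvResolveLoop_measure _h _hc

-- resolve one location, updating the cache for every node on the followed path
def resolve (m cache : PySem.Dict Int Int) (v : Int) : Int × PySem.Dict Int Int :=
  let r := resolveLoop m cache PySem.Dict.empty [] v
  let pos := r.1
  let path := r.2.1
  let v' := r.2.2
  if cache.contains v' = true then
    let e := cache.getD v' 0
    (e, path.foldl (fun c u => c.insert u e) cache)
  else if pos.contains v' = true then
    let i := pos.getD v' 0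
    let c1 := (PySem.List.slice path none (some i)).foldl (fun c u => c.insert u v') cache
    let c2 := (PySem.List.slice path (some i) none).foldl (fun c u => c.insert u u) c1
    (v', c2)
  else
    (v', path.foldl (fun c u => c.insert u v') cache)

def findDataLocations_alt (locations : List Int) (movedFrom : List Int) (movedTo : List Int) : List Int :=
  let dest := PySem.Dict.ofList (movedFrom.zip movedTo)
  let res := locations.foldl
    (fun (st : List Int × PySem.Dict Int Int) v =>
      let rc := resolve dest st.2 v
      (st.1 ++ [rc.1], rc.2))
    (([] : List Int), PySem.Dict.empty)
  PySem.List.sorted res.1 (fun x => x) false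

-- ===== PRECONDITION & SPEC =====
def Spec_findDataLocations (locations : List Int) (movedFrom : List Int) (movedTo : List Int) (out : List Int) : Prop := out = findDataLocations_alt locations movedFrom movedTo
instance (locations : List Int) (movedFrom : List Int) (movedTo : List Int) (out : List Int) : Decidable (Spec_findDataLocations locations movedFrom movedTo out) := by unfold Spec_findDataLocations; infer_instance

-- ===== CLAIM (what is proved, stated in full; the proofs are below) =====
def Claim_equal_findDataLocations : Prop := ∀ (locations : List Int) (movedFrom : List Int) (movedTo : List Int), Dom_findDataLocations locations movedFrom movedTo → Spec_findDataLocations locations movedFrom movedTo (findDataLocations locations movedFrom movedTo)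

-- ===== LEMMAS AND PROOFS =====

-- ## reference walk: follow the chain consuming the map (ground truth for both programs)

theorem pvErase_size_lt {m : PySem.Dict Int Int} {v nxt : Int}
    (h : m.get? v = some nxt) : (m.erase v).items.length < m.items.length := by
  have hmem : (v, nxt) ∈ m.items := PySem.Dict.mem_items_of_get?_eq_some m h
  simp only [PySem.Dict.erase]
  exact List.length_filter_lt_length_iff_exists.mpr ⟨(v, nxt), hmem, by simp⟩

def pvW (M : PySem.Dict Int Int) (v : Int) : Int :=
  match _h : M.get? v with
  | none => v
  | some nxt => pvW (M.erase v) nxt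
termination_by M.items.length
decreasing_by exact pvErase_size_lt _h

def pvVisits (M : PySem.Dict Int Int) (v : Int) : List Int :=
  match _h : M.get? v with
  | none => []
  | some nxt => v :: pvVisits (M.erase v) nxt
termination_by M.items.length
decreasing_by exact pvErase_size_lt _h

theorem pvW_none {M : PySem.Dict Int Int} {v : Int} (h : M.get? v = none) : pvW M v = v := by
  unfold pvW; split <;> simp_all

theorem pvW_some {M : PySem.Dict Int Int} {v w : Int} (h : M.get? v = some w) :
    pvW M v = pvW (M.erase v) w := by
  conv_lhs => unfold pvW
  split
  · simp_all
  · rename_i w' h'; rw [h] at h'; simp only [Option.some.injEq] at h'; subst h'; rfl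

theorem pvVisits_none {M : PySem.Dict Int Int} {v : Int} (h : M.get? v = none) :
    pvVisits M v = [] := by
  unfold pvVisits; split <;> simp_all

theorem pvVisits_some {M : PySem.Dict Int Int} {v w : Int} (h : M.get? v = some w) :
    pvVisits M v = v :: pvVisits (M.erase v) w := by
  conv_lhs => unfold pvVisits
  split
  · simp_all
  · rename_i w' h'; rw [h] at h'; simp only [Option.some.injEq] at h'; subst h'; rfl

-- ## erase / eraseSet lookup lemmas (PySem ships no erase lemmas)

theorem pvGet?_erase (m : PySem.Dict Int Int) (k v : Int) :
    (m.erase k).get? v = if v = k then none else m.get? v := by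
  obtain ⟨items⟩ := m
  simp only [PySem.Dict.erase, PySem.Dict.get?]
  induction items with
  | nil => simp
  | cons p rest ih =>
    by_cases hpk : p.1 = k <;> by_cases hpv : p.1 = v <;>
      simp_all

theorem pvErase_comm (m : PySem.Dict Int Int) (a b : Int) :
    (m.erase a).erase b = (m.erase b).erase a := by
  apply PySem.Dict.ext
  simp only [PySem.Dict.erase]
  rw [List.filter_comm]

def pvEraseSet (m : PySem.Dict Int Int) (s : List Int) : PySem.Dict Int Int :=
  s.foldl PySem.Dict.erase m

theorem pvEraseSet_nil (m : PySem.Dict Int Int) : pvEraseSet m [] = m := rfl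

theorem pvEraseSet_cons (m : PySem.Dict Int Int) (x : Int) (s : List Int) :
    pvEraseSet m (x :: s) = pvEraseSet (m.erase x) s := rfl

theorem pvGet?_eraseSet (s : List Int) (m : PySem.Dict Int Int) (v : Int) :
    (pvEraseSet m s).get? v = if v ∈ s then none else m.get? v := by
  induction s generalizing m with
  | nil => simp [pvEraseSet]
  | cons k rest ih =>
    rw [pvEraseSet_cons, ih]
    by_cases hv : v ∈ rest <;> by_cases hvk : v = k <;>
      simp_all [pvGet?_erase]

theorem pvEraseSet_append_singleton (m : PySem.Dict Int Int) (s : List Int) (k : Int) :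
    pvEraseSet m (s ++ [k]) = (pvEraseSet m s).erase k := by
  simp [pvEraseSet, List.foldl_append]

theorem pvEraseSet_erase_comm (m : PySem.Dict Int Int) (x : Int) (s : List Int) :
    pvEraseSet (m.erase x) s = (pvEraseSet m s).erase x := by
  induction s generalizing m with
  | nil => rfl
  | cons k rest ih => rw [pvEraseSet_cons, pvErase_comm, ih, pvEraseSet_cons]

theorem pvSub_erase {m : PySem.Dict Int Int} {x k : Int} {w : Int}
    (h : (m.erase x).get? k = some w) : m.get? k = some w := by
  rw [pvGet?_erase] at h
  split at h <;> simp_all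

theorem pvSub_eraseSet {m : PySem.Dict Int Int} {s : List Int} {k w : Int}
    (h : (pvEraseSet m s).get? k = some w) : m.get? k = some w := by
  rw [pvGet?_eraseSet] at h
  split at h <;> simp_all

-- ## chains: an explicit record of a walk prefix

def pvIsChain (M : PySem.Dict Int Int) (v : Int) (q : List Int) (z : Int) : Prop :=
  match q with
  | [] => z = v
  | u :: rest => u = v ∧ ∃ w, M.get? v = some w ∧ pvIsChain (M.erase v) w rest z

theorem pvChain_self (M : PySem.Dict Int Int) (v : Int) :
    pvIsChain M v (pvVisits M v) (pvW M v) := by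
  induction M, v using pvVisits.induct with
  | case1 M v h => rw [pvVisits_none h, pvW_none h]; exact rfl
  | case2 M v w h ih =>
    rw [pvVisits_some h, pvW_some h]
    exact ⟨rfl, w, h, ih⟩

theorem pvChain_walk {M : PySem.Dict Int Int} {v z : Int} {q : List Int}
    (h : pvIsChain M v q z) :
    pvW M v = pvW (pvEraseSet M q) z ∧ pvVisits M v = q ++ pvVisits (pvEraseSet M q) z := by
  induction q generalizing M v with
  | nil => obtain rfl := h; simp [pvEraseSet_nil]
  | cons u rest ih =>
    obtain ⟨rfl, w, hw, hrest⟩ := h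
    obtain ⟨h1, h2⟩ := ih hrest
    rw [pvW_some hw, pvVisits_some hw, pvEraseSet_cons, h1, h2]
    simp

theorem pvChain_unerase {M : PySem.Dict Int Int} {x v z : Int} {q : List Int}
    (h : pvIsChain (M.erase x) v q z) : pvIsChain M v q z := by
  induction q generalizing M v x with
  | nil => exact h
  | cons u rest ih =>
    obtain ⟨rfl, w, hw, hrest⟩ := h
    refine ⟨rfl, w, pvSub_erase hw, ?_⟩
    rw [pvErase_comm] at hrest
    exact ih hrest

theorem pvChain_uneraseSet {M : PySem.Dict Int Int} {s : List Int} {v z : Int} {q : List Int}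
    (h : pvIsChain (pvEraseSet M s) v q z) : pvIsChain M v q z := by
  induction s generalizing M with
  | nil => exact h
  | cons k rest ih =>
    rw [pvEraseSet_cons] at h
    exact pvChain_unerase (ih h)

theorem pvChain_erase {M : PySem.Dict Int Int} {x v z : Int} {q : List Int}
    (h : pvIsChain M v q z) (hx : x ∉ q) : pvIsChain (M.erase x) v q z := by
  induction q generalizing M v with
  | nil => exact h
  | cons u rest ih =>
    obtain ⟨he, w, hw, hrest⟩ := h
    subst he
    have hxv : u ≠ x := fun he' => hx (by simp [he'])
    refine ⟨rfl, w, ?_, ?_⟩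
    · rw [pvGet?_erase]; simp [hxv, hw]
    · rw [pvErase_comm]
      exact ih hrest (fun hm => hx (by simp [hm]))

theorem pvChain_eraseSet {M : PySem.Dict Int Int} {s : List Int} {v z : Int} {q : List Int}
    (h : pvIsChain M v q z) (hs : ∀ x ∈ s, x ∉ q) : pvIsChain (pvEraseSet M s) v q z := by
  induction s generalizing M with
  | nil => exact h
  | cons k rest ih =>
    rw [pvEraseSet_cons]
    exact ih (pvChain_erase h (hs k (by simp))) (fun x hx => hs x (by simp [hx]))

theorem pvChain_append {M : PySem.Dict Int Int} {v mid z : Int} {q₁ q₂ : List Int}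
    (h1 : pvIsChain M v q₁ mid) (h2 : pvIsChain (pvEraseSet M q₁) mid q₂ z) :
    pvIsChain M v (q₁ ++ q₂) z := by
  induction q₁ generalizing M v with
  | nil => obtain rfl := h1; exact h2
  | cons u rest ih =>
    obtain ⟨rfl, w, hw, hrest⟩ := h1
    rw [pvEraseSet_cons] at h2
    exact ⟨rfl, w, hw, ih hrest h2⟩

theorem pvChain_split {M : PySem.Dict Int Int} {v z : Int} {q₁ q₂ : List Int}
    (h : pvIsChain M v (q₁ ++ q₂) z) :
    ∃ mid, pvIsChain M v q₁ mid ∧ pvIsChain (pvEraseSet M q₁) mid q₂ z := by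
  induction q₁ generalizing M v with
  | nil => exact ⟨v, rfl, h⟩
  | cons u rest ih =>
    obtain ⟨rfl, w, hw, hrest⟩ := h
    obtain ⟨mid, hm1, hm2⟩ := ih hrest
    exact ⟨mid, ⟨rfl, w, hw, hm1⟩, by rw [pvEraseSet_cons]; exact hm2⟩

theorem pvChain_get {M : PySem.Dict Int Int} {v z : Int} {q : List Int}
    (h : pvIsChain M v q z) (hnd : q.Nodup) :
    ∀ j (hj : j < q.length),
      M.get? q[j] = some (if h' : j + 1 < q.length then q[j+1] else z) := by
  induction q generalizing M v with
  | nil => intro j hj; simp at hj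
  | cons u rest ih =>
    obtain ⟨he, w, hw, hrest⟩ := h
    subst he
    intro j hj
    match j with
    | 0 =>
      simp only [List.getElem_cons_zero]
      rw [hw]
      congr 1
      match rest, hrest with
      | [], hr => obtain rfl := hr; simp
      | r0 :: rr, hr => obtain ⟨rfl, _⟩ := hr; simp
    | j + 1 =>
      have hr : j < rest.length := by simpa using hj
      have := ih hrest (List.nodup_cons.mp hnd).2 j hr
      have hne : rest[j] ≠ u := by
        intro he'
        exact (List.nodup_cons.mp hnd).1 (he' ▸ List.getElem_mem hr)
      rw [pvGet?_erase, if_neg hne] at this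
      simp only [List.getElem_cons_succ]
      rw [this]
      have hiff : j + 1 < rest.length ↔ j + 1 + 1 < rest.length + 1 := by omega
      by_cases hlt : j + 1 < rest.length
      · rw [dif_pos hlt, dif_pos (by simp only [List.length_cons]; omega : j + 1 + 1 < (u :: rest).length)]
      · rw [dif_neg hlt, dif_neg (by simp only [List.length_cons]; omega : ¬ j + 1 + 1 < (u :: rest).length)]

-- ## facts about pvVisits / pvW

theorem pvMem_visits_contains {M : PySem.Dict Int Int} {v : Int} :
    ∀ k ∈ pvVisits M v, M.contains k = true := by
  induction M, v using pvVisits.induct with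
  | case1 M v h => rw [pvVisits_none h]; simp
  | case2 M v w h ih =>
    rw [pvVisits_some h]
    intro k hk
    rcases List.mem_cons.mp hk with rfl | hk
    · rw [PySem.Dict.contains_eq_isSome_get?, h]; rfl
    · have := ih k hk
      rw [PySem.Dict.contains_eq_isSome_get?] at this ⊢
      rw [pvGet?_erase] at this
      split at this <;> simp_all
      
theorem pvW_stop (M : PySem.Dict Int Int) (v : Int) :
    M.get? (pvW M v) = none ∨ pvW M v ∈ pvVisits M v := by
  induction M, v using pvW.induct with
  | case1 M v h => rw [pvW_none h]; exact Or.inl h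
  | case2 M v w h ih =>
    rw [pvW_some h, pvVisits_some h]
    rcases ih with hl | hr
    · rw [pvGet?_erase] at hl
      split at hl
      · rename_i he; exact Or.inr (by simp [he])
      · exact Or.inl hl
    · exact Or.inr (List.mem_cons_of_mem _ hr)

theorem pvW_lift {M' M : PySem.Dict Int Int} {v : Int}
    (hsub : ∀ k w, M'.get? k = some w → M.get? k = some w)
    (hstop : M.get? (pvW M' v) = none ∨ pvW M' v ∈ pvVisits M' v) :
    pvW M v = pvW M' v := by
  induction M', v using pvW.induct generalizing M with
  | case1 M' v h =>
    rw [pvW_none h] at *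
    rcases hstop with hl | hr
    · exact pvW_none hl
    · rw [pvVisits_none h] at hr; simp at hr
  | case2 M' v w h ih =>
    have hM : M.get? v = some w := hsub _ _ h
    rw [pvW_some h] at *
    rw [pvW_some hM]
    apply ih
    · intro k x hk
      have hkv : k ≠ v := by
        intro he; subst he
        rw [pvGet?_erase] at hk; simp at hk
      have := pvSub_erase hk
      rw [pvGet?_erase]
      simp [hkv, hsub _ _ this]
    · rcases hstop with hl | hr
      · left; rw [pvGet?_erase]; split <;> simp_all
      · rw [pvVisits_some h] at hr
        rcases List.mem_cons.mp hr with he | hm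
        · left; rw [pvGet?_erase]; simp [he]
        · right; exact hm

theorem pvW_erase_of_not_visit {M : PySem.Dict Int Int} {x v : Int}
    (hx : x ∉ pvVisits M v) : pvW (M.erase x) v = pvW M v := by
  induction M, v using pvW.induct generalizing x with
  | case1 M v h =>
    rw [pvW_none h, pvW_none (by rw [pvGet?_erase]; split <;> simp_all)]
  | case2 M v w h ih =>
    rw [pvVisits_some h] at hx
    have hxv : v ≠ x := fun he => hx (by simp [he])
    have hget : (M.erase x).get? v = some w := by rw [pvGet?_erase]; simp [hxv, h]
    rw [pvW_some h, pvW_some hget, pvErase_comm]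
    exact ih (fun hm => hx (by simp [hm]))

-- ## closed key sets (the cache's keys are closed under successors inside the map)

def pvClosed (m : PySem.Dict Int Int) (S : List Int) : Prop :=
  ∀ k ∈ S, m.contains k = true ∧
    ∀ w, m.get? k = some w → m.contains w = true → w ∈ S

theorem pvClosed_erase {m : PySem.Dict Int Int} {S : List Int} {x : Int}
    (hc : pvClosed m S) (hx : x ∉ S) : pvClosed (m.erase x) S := by
  intro k hk
  obtain ⟨h1, h2⟩ := hc k hk
  have hkx : k ≠ x := fun he => hx (he ▸ hk)
  constructor
  · rw [PySem.Dict.contains_eq_isSome_get?, pvGet?_erase] at *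
    simp [hkx]; simpa [hkx] using h1
  · intro w hw hcw
    have hw' := pvSub_erase hw
    apply h2 w hw'
    rw [PySem.Dict.contains_eq_isSome_get?, pvGet?_erase] at hcw
    rw [PySem.Dict.contains_eq_isSome_get?]
    split at hcw <;> simp_all

theorem pvVisits_closed_sub {m M' : PySem.Dict Int Int} {S : List Int} {v : Int}
    (hsub : ∀ k w, M'.get? k = some w → m.get? k = some w)
    (hc : pvClosed m S) (hv : v ∈ S) : ∀ k ∈ pvVisits M' v, k ∈ S := by
  induction M', v using pvVisits.induct with
  | case1 M' v h => rw [pvVisits_none h]; simp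
  | case2 M' v w h ih =>
    rw [pvVisits_some h]
    intro k hk
    rcases List.mem_cons.mp hk with rfl | hk
    · exact hv
    · have hm : m.get? v = some w := hsub _ _ h
      by_cases hcw : m.contains w = true
      · have hwS : w ∈ S := (hc v hv).2 w hm hcw
        exact ih (fun k x hx => hsub _ _ (pvSub_erase hx)) hwS k hk
      · have : m.get? w = none := by
          rw [PySem.Dict.contains_eq_isSome_get?] at hcw
          cases hx : m.get? w <;> simp_all
        have hMw : M'.get? w = none := by
          cases hx : M'.get? w with
          | none => rfl
          | some y => have := hsub _ _ hx; simp_all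
        have : (M'.erase v).get? w = none := by
          rw [pvGet?_erase]; split <;> simp_all
        rw [pvVisits_none this] at hk
        simp at hk

theorem pvW_cached_lift {S : List Int} :
    ∀ n (m : PySem.Dict Int Int) (v : Int), m.items.length ≤ n →
    pvClosed m S → pvW (pvEraseSet m S) v ∈ S →
    pvW m v = pvW m (pvW (pvEraseSet m S) v) := by
  intro n
  induction n with
  | zero =>
    intro m v hlen hc hstop
    cases hx : (pvEraseSet m S).get? v with
    | none => rw [pvW_none hx]
    | some w =>
      have := pvSub_eraseSet hx
      have := pvErase_size_lt this
      omega
  | succ n ih =>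
    intro m v hlen hc hstop
    cases hx : (pvEraseSet m S).get? v with
    | none => rw [pvW_none hx]
    | some w =>
      have hvS : v ∉ S := by
        rw [pvGet?_eraseSet] at hx; split at hx <;> simp_all
      have hm : m.get? v = some w := pvSub_eraseSet hx
      have hrw : pvW (pvEraseSet m S) v = pvW (pvEraseSet (m.erase v) S) w := by
        rw [pvW_some hx, pvEraseSet_erase_comm]
      have hlen' : (m.erase v).items.length ≤ n := by
        have := pvErase_size_lt hm; omega
      have hrec := ih (m.erase v) w hlen' (pvClosed_erase hc hvS) (by rw [← hrw]; exact hstop)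
      rw [pvW_some hm, hrec, ← hrw]
      apply pvW_erase_of_not_visit
      intro hv
      exact hvS (pvVisits_closed_sub (fun k w h => h) hc hstop v hv)

-- ## cache-update folds

theorem pvGet?_foldl_insert_of_not_mem (f : Int → Int) (l : List Int)
    (c : PySem.Dict Int Int) (k : Int) (hk : k ∉ l) :
    (l.foldl (fun c u => c.insert u (f u)) c).get? k = c.get? k := by
  induction l generalizing c with
  | nil => rfl
  | cons u rest ih =>
    simp only [List.foldl_cons]
    rw [ih (c.insert u (f u)) (fun h => hk (by simp [h])),
        PySem.Dict.get?_insert_of_ne _ _ (fun h => hk (by simp [h]))]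

theorem pvGetD_foldl_insert_of_mem (f : Int → Int) (l : List Int)
    (c : PySem.Dict Int Int) (k : Int) (hnd : l.Nodup) (hk : k ∈ l) :
    (l.foldl (fun c u => c.insert u (f u)) c).getD k 0 = f k := by
  induction l generalizing c with
  | nil => simp at hk
  | cons u rest ih =>
    simp only [List.foldl_cons]
    rcases List.mem_cons.mp hk with rfl | hk'
    · rw [PySem.Dict.getD_eq_get?_getD,
          pvGet?_foldl_insert_of_not_mem _ _ _ _ (List.nodup_cons.mp hnd).1,
          PySem.Dict.get?_insert_self]
      rfl
    · exact ih _ (List.nodup_cons.mp hnd).2 hk'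

theorem pvContains_foldl_insert (f : Int → Int) (l : List Int)
    (c : PySem.Dict Int Int) (k : Int) :
    (l.foldl (fun c u => c.insert u (f u)) c).contains k = true ↔ k ∈ l ∨ c.contains k = true := by
  induction l generalizing c with
  | nil => simp
  | cons u rest ih =>
    simp only [List.foldl_cons]
    rw [ih, PySem.Dict.contains_insert]
    constructor
    · rintro (h | h)
      · exact Or.inl (by simp [h])
      · cases hx : (k == u) <;> simp_all
    · rintro (h | h)
      · rcases List.mem_cons.mp h with rfl | h'
        · right; simp
        · exact Or.inl h'
      · right; simp [h]

-- ## the resolve loop follows the walk on the map with cached keys and the path removed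

theorem pvLoop_none {m cache pos : PySem.Dict Int Int} {path : List Int} {v : Int}
    (h : m.get? v = none) : resolveLoop m cache pos path v = (pos, path, v) := by
  unfold resolveLoop; split <;> simp_all

theorem pvLoop_stop {m cache pos : PySem.Dict Int Int} {path : List Int} {v w : Int}
    (h : m.get? v = some w) (hc : (cache.contains v || pos.contains v) = true) :
    resolveLoop m cache pos path v = (pos, path, v) := by
  conv_lhs => unfold resolveLoop
  split
  · rfl
  · exact dif_pos hc

theorem pvLoop_step {m cache pos : PySem.Dict Int Int} {path : List Int} {v w : Int}
    (h : m.get? v = some w) (hc : ¬ (cache.contains v || pos.contains v) = true) :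
    resolveLoop m cache pos path v
      = resolveLoop m cache (pos.insert v (path.length : Int)) (path ++ [v]) w := by
  conv_lhs => unfold resolveLoop
  split
  · simp_all
  · rename_i w' h'
    rw [h] at h'
    simp only [Option.some.injEq] at h'
    subst h'
    exact dif_neg hc

theorem pvLoop_char (m cache : PySem.Dict Int Int) :
    ∀ pos (path : List Int) (v : Int), path.Nodup →
    (∀ k, pos.get? k = if k ∈ path then some (path.idxOf k : Int) else none) →
    (resolveLoop m cache pos path v).2.1
        = path ++ pvVisits (pvEraseSet (pvEraseSet m cache.keys) path) v
      ∧ (resolveLoop m cache pos path v).2.2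
        = pvW (pvEraseSet (pvEraseSet m cache.keys) path) v
      ∧ ((resolveLoop m cache pos path v).2.1).Nodup
      ∧ (∀ k, (resolveLoop m cache pos path v).1.get? k =
          if k ∈ (resolveLoop m cache pos path v).2.1
          then some (((resolveLoop m cache pos path v).2.1).idxOf k : Int) else none) := by
  intro pos path v
  induction pos, path, v using resolveLoop.induct m cache with
  | case1 pos path v h =>
    intro hnd hpos
    have hnone : (pvEraseSet (pvEraseSet m cache.keys) path).get? v = none := by
      rw [pvGet?_eraseSet]
      split
      · rfl
      · rw [pvGet?_eraseSet]; split <;> simp_all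
    rw [pvLoop_none h]
    exact ⟨by rw [pvVisits_none hnone]; simp, by rw [pvW_none hnone], hnd, hpos⟩
  | case2 pos path v w h hc =>
    intro hnd hpos
    have hnone : (pvEraseSet (pvEraseSet m cache.keys) path).get? v = none := by
      rcases Bool.or_eq_true_iff.mp hc with h1 | h1
      · have hkeys : v ∈ cache.keys := (PySem.Dict.contains_iff_mem_keys cache v).mp h1
        rw [pvGet?_eraseSet]
        split
        · rfl
        · rw [pvGet?_eraseSet]; simp [hkeys]
      · have hvp : v ∈ path := by
          have := hpos v
          rw [PySem.Dict.contains_eq_isSome_get?, this] at h1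
          by_contra hnp
          rw [if_neg hnp] at h1
          simp at h1
        rw [pvGet?_eraseSet]; simp [hvp]
    rw [pvLoop_stop h hc]
    exact ⟨by rw [pvVisits_none hnone]; simp, by rw [pvW_none hnone], hnd, hpos⟩
  | case3 pos path v w h hc ih =>
    intro hnd hpos
    have hcc : cache.contains v = false := by cases hx : cache.contains v <;> simp_all
    have hcp : pos.contains v = false := by cases hx : pos.contains v <;> simp_all
    have hvpath : v ∉ path := by
      intro hvp
      have := hpos v
      rw [if_pos hvp] at this
      rw [PySem.Dict.contains_eq_isSome_get?, this] at hcp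
      simp at hcp
    have hvkeys : v ∉ cache.keys := by
      intro hk
      rw [(PySem.Dict.contains_iff_mem_keys cache v).mpr hk] at hcc
      exact Bool.true_eq_false.mp hcc
    have hMM2 : (pvEraseSet (pvEraseSet m cache.keys) path).get? v = some w := by
      rw [pvGet?_eraseSet, if_neg hvpath, pvGet?_eraseSet, if_neg hvkeys]
      exact h
    have hnd' : (path ++ [v]).Nodup := by
      rw [List.nodup_append]
      refine ⟨hnd, by simp, ?_⟩
      intro a ha b hb
      have hbv : b = v := by simpa using hb
      subst hbv
      exact fun he => hvpath (he ▸ ha)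
    have hpos' : ∀ k, (pos.insert v (path.length : Int)).get? k =
        if k ∈ path ++ [v] then some (((path ++ [v]).idxOf k : Nat) : Int) else none := by
      intro k
      rw [PySem.Dict.get?_insert]
      by_cases hk : k = v
      · subst hk
        rw [if_pos rfl, if_pos (by simp)]
        simp [List.idxOf_append, hvpath]
      · rw [if_neg hk, hpos k]
        by_cases hkp : k ∈ path
        · rw [if_pos hkp, if_pos (by simp [hkp])]
          simp [List.idxOf_append, hkp]
        · rw [if_neg hkp, if_neg (by simp [hkp, hk])]
    obtain ⟨ih1, ih2, ih3, ih4⟩ := ih hnd' hpos'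
    rw [pvLoop_step h hc]
    refine ⟨?_, ?_, ih3, ih4⟩
    · rw [ih1, pvVisits_some hMM2, pvEraseSet_append_singleton]
      simp
    · rw [ih2, pvW_some hMM2, pvEraseSet_append_singleton]

-- invariant: every cached key resolves correctly, is in the map, and its successor
-- (when itself a key) is cached too
def pvInv (m cache : PySem.Dict Int Int) : Prop :=
  ∀ k, cache.contains k = true →
    cache.getD k 0 = pvW m k ∧ m.contains k = true ∧
    (∀ w, m.get? k = some w → m.contains w = true → cache.contains w = true)

theorem pvChain_suffix {M : PySem.Dict Int Int} {v z : Int} {p : List Int}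
    (hch : pvIsChain M v p z) (j : Nat) (hj : j < p.length) :
    pvIsChain M p[j] (p.drop j) z := by
  have hch' := hch
  rw [← List.take_append_drop j p] at hch'
  obtain ⟨mid, _h1, h2⟩ := pvChain_split hch'
  have hdrop : p.drop j = p[j] :: p.drop (j+1) := List.drop_eq_getElem_cons hj
  rw [hdrop] at h2
  obtain ⟨heq, hrest⟩ := h2
  subst heq
  exact pvChain_uneraseSet (by rw [hdrop]; exact ⟨rfl, hrest⟩)

theorem pvW_of_chain_stopped {M : PySem.Dict Int Int} {u z : Int} {q : List Int}
    (hch : pvIsChain M u q z) (hz : (pvEraseSet M q).get? z = none) :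
    pvW M u = z ∧ pvVisits M u = q := by
  obtain ⟨h1, h2⟩ := pvChain_walk hch
  rw [pvW_none hz] at h1
  rw [pvVisits_none hz] at h2
  exact ⟨h1, by simpa using h2⟩

theorem pvSelf_mem_drop (p : List Int) (j : Nat) (hj : j < p.length) : p[j] ∈ p.drop j :=
  List.mem_iff_getElem.mpr ⟨0, by rw [List.length_drop]; omega, by rw [List.getElem_drop]; simp⟩

set_option maxHeartbeats 1000000 in
theorem pvResolve_correct (m cache : PySem.Dict Int Int) (v : Int) (hInv : pvInv m cache) :
    (resolve m cache v).1 = pvW m v ∧ pvInv m ((resolve m cache v).2) := by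
  obtain ⟨hpathEq, hvEq, hndF, hposF⟩ :=
    pvLoop_char m cache PySem.Dict.empty [] v (by simp)
      (by intro k; simp [PySem.Dict.get?_empty])
  set r := resolveLoop m cache PySem.Dict.empty [] v with hr
  set M := pvEraseSet m cache.keys with hM
  set path := r.2.1 with hpath
  set v' := r.2.2 with hv'
  simp only [pvEraseSet_nil, List.nil_append] at hpathEq hvEq
  -- hpathEq : path = pvVisits M v ; hvEq : v' = pvW M v
  have hresolve : resolve m cache v =
      if cache.contains v' = true then
        (cache.getD v' 0, path.foldl (fun c u => c.insert u (cache.getD v' 0)) cache)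
      else if r.1.contains v' = true then
        (v', (PySem.List.slice path (some (r.1.getD v' 0)) none).foldl (fun c u => c.insert u u)
          ((PySem.List.slice path none (some (r.1.getD v' 0))).foldl (fun c u => c.insert u v') cache))
      else
        (v', path.foldl (fun c u => c.insert u v') cache) := rfl
  have hch : pvIsChain M v path v' := by rw [hpathEq, hvEq]; exact pvChain_self M v
  have hClosed : pvClosed m cache.keys := by
    intro k hk
    have hck : cache.contains k = true := (PySem.Dict.contains_iff_mem_keys cache k).mpr hk
    obtain ⟨_, h2, h3⟩ := hInv k hck
    exact ⟨h2, fun w hw hcw => (PySem.Dict.contains_iff_mem_keys cache w).mp (h3 w hw hcw)⟩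
  have hsubM : ∀ k w, M.get? k = some w → m.get? k = some w := fun k w h => pvSub_eraseSet h
  have hpath_not_cached : ∀ u ∈ path, u ∉ cache.keys := by
    intro u hu
    have hc := pvMem_visits_contains u (hpathEq ▸ hu)
    rw [PySem.Dict.contains_eq_isSome_get?, pvGet?_eraseSet] at hc
    intro hk
    rw [if_pos hk] at hc
    simp at hc
  have hpath_in_m : ∀ u ∈ path, m.contains u = true := by
    intro u hu
    have hc := pvMem_visits_contains u (hpathEq ▸ hu)
    rw [PySem.Dict.contains_eq_isSome_get?] at hc ⊢
    cases hx : M.get? u with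
    | none => rw [hx] at hc; simp at hc
    | some w => rw [hsubM u w hx]; rfl
  have hsucc : ∀ j (hj : j < path.length),
      m.get? path[j] = some (if _h' : j + 1 < path.length then path[j+1] else v') := by
    intro j hj
    exact hsubM _ _ (pvChain_get hch hndF j hj)
  rw [hresolve]
  split_ifs with hcv hpv
  · -- branch 1: stop is cached
    have hv'keys : v' ∈ cache.keys := (PySem.Dict.contains_iff_mem_keys cache v').mp hcv
    have hMv' : M.get? v' = none := by rw [hM, pvGet?_eraseSet, if_pos hv'keys]
    have hv'path : v' ∉ path := fun hp => (hpath_not_cached v' hp) hv'keys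
    have hstopq : ∀ q : List Int, v' ∉ q → (pvEraseSet M q).get? v' = none := by
      intro q hq
      rw [pvGet?_eraseSet, if_neg hq]
      exact hMv'
    have hvalM : ∀ (u : Int) (q : List Int), pvIsChain M u q v' → v' ∉ q →
        pvW M u = v' ∧ pvVisits M u = q :=
      fun u q hc hq => pvW_of_chain_stopped hc (hstopq q hq)
    have hlift : ∀ (u : Int) (q : List Int), pvIsChain M u q v' → v' ∉ q →
        pvW m u = pvW m v' := by
      intro u q hc hq
      obtain ⟨h1, _⟩ := hvalM u q hc hq
      have hcl := pvW_cached_lift (S := cache.keys) m.items.length m u le_rfl hClosed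
        (by rw [← hM, h1]; exact hv'keys)
      rw [← hM, h1] at hcl
      exact hcl
    have hval_e : cache.getD v' 0 = pvW m v' := (hInv v' hcv).1
    have hstart : pvW m v = pvW m v' := hlift v path hch hv'path
    have hvalm : ∀ j (hj : j < path.length), pvW m path[j] = pvW m v' := fun j hj =>
      hlift path[j] (path.drop j) (pvChain_suffix hch j hj)
        (fun hq => hv'path (List.mem_of_mem_drop hq))
    constructor
    · rw [hval_e]; exact hstart.symm
    · intro k hk
      rw [pvContains_foldl_insert] at hk
      by_cases hkp : k ∈ path
      · obtain ⟨j, hj, hje⟩ := List.mem_iff_getElem.mp hkp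
        refine ⟨?_, hpath_in_m _ hkp, ?_⟩
        · rw [pvGetD_foldl_insert_of_mem _ _ _ _ hndF hkp, hval_e, ← hje, hvalm j hj]
        · intro w hw hcw
          have hs := hsucc j hj
          rw [hje, hw] at hs
          have hweq := Option.some.inj hs
          by_cases hlt : j + 1 < path.length
          · rw [dif_pos hlt] at hweq
            exact (pvContains_foldl_insert _ _ _ _).mpr
              (Or.inl (hweq ▸ List.getElem_mem hlt))
          · rw [dif_neg hlt] at hweq
            exact (pvContains_foldl_insert _ _ _ _).mpr (Or.inr (hweq ▸ hcv))
      · have hkc : cache.contains k = true := by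
          rcases hk with h | h
          · exact absurd h hkp
          · exact h
        obtain ⟨i1, i2, i3⟩ := hInv k hkc
        refine ⟨?_, i2, ?_⟩
        · rw [PySem.Dict.getD_eq_get?_getD, pvGet?_foldl_insert_of_not_mem _ _ _ _ hkp,
              ← PySem.Dict.getD_eq_get?_getD, i1]
        · intro w hw hcw
          exact (pvContains_foldl_insert _ _ _ _).mpr (Or.inr (i3 w hw hcw))
  · -- branch 2: stop closes a cycle on the path
    have hv'path : v' ∈ path := by
      by_contra hnp
      have hx := hposF v'
      rw [if_neg hnp] at hx
      rw [PySem.Dict.contains_eq_isSome_get?, hx] at hpv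
      simp at hpv
    have hi : path.idxOf v' < path.length := List.idxOf_lt_length_of_mem hv'path
    set i := path.idxOf v' with hidef
    have hgetI : path[i] = v' := List.getElem_idxOf hi
    have hIdx : r.1.getD v' 0 = (i : Int) := by
      rw [PySem.Dict.getD_eq_get?_getD, hposF v', if_pos hv'path]
      rfl
    rw [hIdx, PySem.List.slice_to_natCast path i, PySem.List.slice_from_natCast path i]
    -- per-index values, prefix part (j ≤ i): the walk runs into the cycle entry v'
    have hpre : ∀ j (hj : j < path.length), j ≤ i →
        pvW M path[j] = v' ∧ pvVisits M path[j] = path.drop j := by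
      intro j hj hji
      have hvmem : v' ∈ path.drop j := by
        rw [← hgetI]
        exact List.mem_iff_getElem.mpr
          ⟨i - j, by rw [List.length_drop]; omega, by rw [List.getElem_drop]; congr 1; omega⟩
      exact pvW_of_chain_stopped (pvChain_suffix hch j hj)
        (by rw [pvGet?_eraseSet, if_pos hvmem])
    -- per-index values, cycle part (i < j): the walk comes back around to its start
    have hcyc : ∀ j (hj : j < path.length), i < j →
        pvW M path[j] = path[j] ∧
        pvVisits M path[j] = path.drop j ++ (path.take j).drop i := by
      intro j hj hij
      set seg := (path.take j).drop i with hseg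
      have hchj := hch
      rw [← List.take_append_drop j path] at hchj
      obtain ⟨mid, hA, hB⟩ := pvChain_split hchj
      have hdropj : path.drop j = path[j] :: path.drop (j+1) := List.drop_eq_getElem_cons hj
      rw [hdropj] at hB
      obtain ⟨hmidj, hBrest⟩ := hB
      subst hmidj
      have chainB : pvIsChain M path[j] (path.drop j) v' :=
        pvChain_uneraseSet (by rw [hdropj]; exact ⟨rfl, hBrest⟩)
      have htj : path.take j = path.take i ++ seg := by
        have h := List.take_append_drop i (path.take j)
        rw [List.take_take, min_eq_left (le_of_lt hij)] at h
        rw [hseg]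
        exact h.symm
      rw [htj] at hA
      obtain ⟨mid2, _hA1, hA2⟩ := pvChain_split hA
      have hseglen : i < (path.take j).length := by
        rw [List.length_take]; omega
      have hsegcons : seg = v' :: (path.take j).drop (i+1) := by
        rw [hseg, List.drop_eq_getElem_cons hseglen]
        congr 1
        rw [List.getElem_take]
        exact hgetI
      rw [hsegcons] at hA2
      obtain ⟨hm2, hA2rest⟩ := hA2
      subst hm2
      have chainSeg : pvIsChain M v' seg path[j] :=
        pvChain_uneraseSet (by rw [hsegcons]; exact ⟨rfl, hA2rest⟩)
      have hdisj : ∀ x ∈ path.drop j, x ∉ seg := by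
        intro x hx hxs
        obtain ⟨a, ha, hxa⟩ := List.mem_iff_getElem.mp hx
        obtain ⟨b, hb, hxb⟩ := List.mem_iff_getElem.mp hxs
        have ha' : j + a < path.length := by
          have := ha; rw [List.length_drop] at this; omega
        have hb' : i + b < j := by
          have := hb; rw [hseg, List.length_drop, List.length_take] at this; omega
        rw [List.getElem_drop] at hxa
        have hxb' : path[i + b] = x := by
          rw [← hxb]
          simp only [hseg, List.getElem_drop, List.getElem_take]
        have heq : j + a = i + b := by
          apply hndF.getElem_inj_iff.mp
          rw [hxa, hxb']
        omega
      have chainSeg' : pvIsChain (pvEraseSet M (path.drop j)) v' seg path[j] :=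
        pvChain_eraseSet chainSeg (fun x hx hxq => hdisj x hx hxq)
      have chainFull : pvIsChain M path[j] (path.drop j ++ seg) path[j] :=
        pvChain_append chainB chainSeg'
      have hjmem : path[j] ∈ path.drop j ++ seg :=
        List.mem_append_left _ (pvSelf_mem_drop path j hj)
      exact pvW_of_chain_stopped chainFull (by rw [pvGet?_eraseSet, if_pos hjmem])
    -- lift each value to the full map
    have hliftj : ∀ j (hj : j < path.length), pvW m path[j] = pvW M path[j] := by
      intro j hj
      by_cases hji : j ≤ i
      · obtain ⟨h1, h2⟩ := hpre j hj hji
        apply pvW_lift hsubM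
        rw [h1, h2]
        right
        rw [← hgetI]
        exact List.mem_iff_getElem.mpr
          ⟨i - j, by rw [List.length_drop]; omega, by rw [List.getElem_drop]; congr 1; omega⟩
      · obtain ⟨h1, h2⟩ := hcyc j hj (by omega)
        apply pvW_lift hsubM
        rw [h1, h2]
        exact Or.inr (List.mem_append_left _ (pvSelf_mem_drop path j hj))
    have hvalm_pre : ∀ j (hj : j < path.length), j ≤ i → pvW m path[j] = v' := by
      intro j hj hji
      rw [hliftj j hj, (hpre j hj hji).1]
    have hvalm_cyc : ∀ j (hj : j < path.length), i ≤ j → pvW m path[j] = path[j] := by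
      intro j hj hij
      rcases Nat.lt_or_ge i j with hlt | hge
      · rw [hliftj j hj, (hcyc j hj hlt).1]
      · have hji : j = i := by omega
        subst hji
        rw [hvalm_pre i hj (by omega), ← hgetI]
    have hstart : pvW m v = v' := by
      have hst := pvW_of_chain_stopped hch (by rw [pvGet?_eraseSet, if_pos hv'path])
      have hli : pvW m v = pvW M v := by
        apply pvW_lift hsubM
        rw [hst.1, hst.2]
        exact Or.inr hv'path
      rw [hli, hst.1]
    -- membership split of the path at the cycle entry
    have hsplitmem : ∀ x : Int, x ∈ path ↔ x ∈ path.take i ∨ x ∈ path.drop i := by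
      intro x
      conv_lhs => rw [← List.take_append_drop i path]
      exact List.mem_append
    have htakedrop : ∀ x ∈ path.take i, x ∉ path.drop i := by
      intro x hx1 hx2
      obtain ⟨a, ha, hxa⟩ := List.mem_iff_getElem.mp hx1
      obtain ⟨b, hb, hxb⟩ := List.mem_iff_getElem.mp hx2
      have ha' : a < i := by have := ha; rw [List.length_take] at this; omega
      have ha'' : a < path.length := by omega
      have hb' : i + b < path.length := by have := hb; rw [List.length_drop] at this; omega
      rw [List.getElem_take] at hxa
      rw [List.getElem_drop] at hxb
      have heq : a = i + b := by
        apply hndF.getElem_inj_iff.mp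
        rw [hxa, hxb]
      omega
    have hndDrop : (path.drop i).Nodup := (List.drop_sublist i path).nodup hndF
    have hndTake : (path.take i).Nodup := (List.take_sublist i path).nodup hndF
    constructor
    · exact hstart.symm
    · intro k hk
      rw [pvContains_foldl_insert] at hk
      rw [pvContains_foldl_insert] at hk
      have hcontains2 : ∀ x : Int,
          ((path.drop i).foldl (fun c u => c.insert u u)
            ((path.take i).foldl (fun c u => c.insert u v') cache)).contains x = true
            ↔ x ∈ path ∨ cache.contains x = true := by
        intro x
        rw [pvContains_foldl_insert, pvContains_foldl_insert, hsplitmem x]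
        tauto
      by_cases hkp : k ∈ path
      · obtain ⟨j, hj, hje⟩ := List.mem_iff_getElem.mp hkp
        have hval : ((path.drop i).foldl (fun c u => c.insert u u)
              ((path.take i).foldl (fun c u => c.insert u v') cache)).getD k 0 = pvW m k := by
          rcases (hsplitmem k).mp hkp with hkt | hkd
          · have hknd : k ∉ path.drop i := htakedrop k hkt
            rw [PySem.Dict.getD_eq_get?_getD, pvGet?_foldl_insert_of_not_mem _ _ _ _ hknd,
                ← PySem.Dict.getD_eq_get?_getD,
                pvGetD_foldl_insert_of_mem _ _ _ _ hndTake hkt]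
            obtain ⟨a, ha, hxa⟩ := List.mem_iff_getElem.mp hkt
            have ha' : a < i := by have := ha; rw [List.length_take] at this; omega
            have ha'' : a < path.length := by omega
            rw [List.getElem_take] at hxa
            rw [← hxa, hvalm_pre a ha'' (by omega)]
          · rw [pvGetD_foldl_insert_of_mem _ _ _ _ hndDrop hkd]
            obtain ⟨b, hb, hxb⟩ := List.mem_iff_getElem.mp hkd
            have hb' : i + b < path.length := by have := hb; rw [List.length_drop] at this; omega
            rw [List.getElem_drop] at hxb
            rw [← hxb, hvalm_cyc (i + b) hb' (by omega)]
        refine ⟨hval, hpath_in_m _ hkp, ?_⟩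
        intro w hw hcw
        have hs := hsucc j hj
        rw [hje, hw] at hs
        have hweq := Option.some.inj hs
        by_cases hlt : j + 1 < path.length
        · rw [dif_pos hlt] at hweq
          exact (hcontains2 w).mpr (Or.inl (hweq ▸ List.getElem_mem hlt))
        · rw [dif_neg hlt] at hweq
          exact (hcontains2 w).mpr (Or.inl (hweq ▸ hv'path))
      · have hkc : cache.contains k = true := by
          rcases hk with h | h
          · exact absurd ((hsplitmem k).mpr (Or.inr h)) hkp
          · rcases h with h | h
            · exact absurd ((hsplitmem k).mpr (Or.inl h)) hkp
            · exact h
        obtain ⟨i1, i2, i3⟩ := hInv k hkc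
        have hknt : k ∉ path.take i := fun h => hkp ((hsplitmem k).mpr (Or.inl h))
        have hknd : k ∉ path.drop i := fun h => hkp ((hsplitmem k).mpr (Or.inr h))
        refine ⟨?_, i2, ?_⟩
        · rw [PySem.Dict.getD_eq_get?_getD, pvGet?_foldl_insert_of_not_mem _ _ _ _ hknd,
              pvGet?_foldl_insert_of_not_mem _ _ _ _ hknt,
              ← PySem.Dict.getD_eq_get?_getD, i1]
        · intro w hw hcw
          exact (hcontains2 w).mpr (Or.inr (i3 w hw hcw))
  · -- branch 3: stop leaves the map
    have hv'path : v' ∉ path := by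
      intro hp
      have hx := hposF v'
      rw [if_pos hp] at hx
      exact hpv (by rw [PySem.Dict.contains_eq_isSome_get?, hx]; rfl)
    have hv'keys : v' ∉ cache.keys := fun hk =>
      hcv ((PySem.Dict.contains_iff_mem_keys cache v').mpr hk)
    have hMv' : M.get? v' = none := by
      rcases pvW_stop M v with hl | hr2
      · rw [← hvEq] at hl; exact hl
      · exact absurd (by rw [hpathEq]; rw [hvEq]; exact hr2) hv'path
    have hv'm : m.get? v' = none := by
      have := hMv'
      rw [hM, pvGet?_eraseSet, if_neg hv'keys] at this
      exact this
    have hstopq : ∀ q : List Int, v' ∉ q → (pvEraseSet M q).get? v' = none := by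
      intro q hq
      rw [pvGet?_eraseSet, if_neg hq]
      exact hMv'
    have hvalM : ∀ (u : Int) (q : List Int), pvIsChain M u q v' → v' ∉ q →
        pvW M u = v' ∧ pvVisits M u = q :=
      fun u q hc hq => pvW_of_chain_stopped hc (hstopq q hq)
    have hstart : pvW m v = v' := by
      obtain ⟨h1, _⟩ := hvalM v path hch hv'path
      have hli := pvW_lift (M' := M) (M := m) hsubM (Or.inl (by rw [h1]; exact hv'm))
      rw [hli, h1]
    have hvalm : ∀ j (hj : j < path.length), pvW m path[j] = v' := by
      intro j hj
      have hsub' : v' ∉ path.drop j := fun hq => hv'path (List.mem_of_mem_drop hq)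
      obtain ⟨h1, _⟩ := hvalM path[j] (path.drop j) (pvChain_suffix hch j hj) hsub'
      have hli := pvW_lift (M' := M) (M := m) hsubM (Or.inl (by rw [h1]; exact hv'm))
      rw [hli, h1]
    constructor
    · exact hstart.symm
    · intro k hk
      rw [pvContains_foldl_insert] at hk
      by_cases hkp : k ∈ path
      · obtain ⟨j, hj, hje⟩ := List.mem_iff_getElem.mp hkp
        refine ⟨?_, hpath_in_m _ hkp, ?_⟩
        · rw [pvGetD_foldl_insert_of_mem _ _ _ _ hndF hkp, ← hje, hvalm j hj]
        · intro w hw hcw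
          have hs := hsucc j hj
          rw [hje, hw] at hs
          have hweq := Option.some.inj hs
          by_cases hlt : j + 1 < path.length
          · rw [dif_pos hlt] at hweq
            exact (pvContains_foldl_insert _ _ _ _).mpr
              (Or.inl (hweq ▸ List.getElem_mem hlt))
          · rw [dif_neg hlt] at hweq
            rw [hweq, PySem.Dict.contains_eq_isSome_get?, hv'm] at hcw
            simp at hcw
      · have hkc : cache.contains k = true := by
          rcases hk with h | h
          · exact absurd h hkp
          · exact h
        obtain ⟨i1, i2, i3⟩ := hInv k hkc
        refine ⟨?_, i2, ?_⟩
        · rw [PySem.Dict.getD_eq_get?_getD, pvGet?_foldl_insert_of_not_mem _ _ _ _ hkp,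
              ← PySem.Dict.getD_eq_get?_getD, i1]
        · intro w hw hcw
          exact (pvContains_foldl_insert _ _ _ _).mpr (Or.inr (i3 w hw hcw))

theorem pvFold_correct (m : PySem.Dict Int Int) (locations : List Int) :
    ∀ acc (cache : PySem.Dict Int Int), pvInv m cache →
    (locations.foldl
        (fun (st : List Int × PySem.Dict Int Int) v =>
          let rc := resolve m st.2 v
          (st.1 ++ [rc.1], rc.2)) (acc, cache)).1
      = acc ++ locations.map (pvW m) := by
  induction locations with
  | nil => intro acc cache _; simp
  | cons x rest ih =>
    intro acc cache hInv
    simp only [List.foldl_cons, List.map_cons]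
    obtain ⟨h1, h2⟩ := pvResolve_correct m cache x hInv
    rw [ih _ _ h2, h1]
    simp

-- ## A's walk equals the reference walk

theorem pvWalkA_none {m : PySem.Dict Int Int} {visited : PySem.Set Int} {val : Int}
    (h : m.get? val = none) : walkA m visited val = val := by
  unfold walkA; split <;> simp_all

theorem pvWalkA_stop {m : PySem.Dict Int Int} {visited : PySem.Set Int} {val nxt : Int}
    (h : m.get? val = some nxt) (hv : visited.contains val = true) :
    walkA m visited val = val := by
  unfold walkA; split <;> simp_all

theorem pvWalkA_step {m : PySem.Dict Int Int} {visited : PySem.Set Int} {val nxt : Int}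
    (h : m.get? val = some nxt) (hv : ¬ visited.contains val = true) :
    walkA m visited val = walkA m (visited.add val) nxt := by
  conv_lhs => unfold walkA
  split
  · simp_all
  · rename_i nxt' h'
    rw [h] at h'
    simp only [Option.some.injEq] at h'
    subst h'
    exact dif_neg hv

theorem pvWalk_eq (m : PySem.Dict Int Int) (visited : PySem.Set Int) (val : Int) :
    walkA m visited val = pvW (pvEraseSet m visited) val := by
  induction visited, val using walkA.induct m with
  | case1 visited val h =>
    rw [pvWalkA_none h,
        pvW_none (by rw [pvGet?_eraseSet]; split <;> simp_all)]
  | case2 visited val nxt h hv =>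
    have hmem : val ∈ visited := (PySem.Set.contains_iff visited val).mp hv
    rw [pvWalkA_stop h hv, pvW_none (by rw [pvGet?_eraseSet]; simp [hmem])]
  | case3 visited val nxt h hv ih =>
    have hnotmem : val ∉ visited := fun hm => hv ((PySem.Set.contains_iff visited val).mpr hm)
    have hget : (pvEraseSet m visited).get? val = some nxt := by
      rw [pvGet?_eraseSet]; simp [hnotmem, h]
    rw [pvWalkA_step h hv, ih, pvW_some hget,
        PySem.Set.add_of_not_mem hnotmem, pvEraseSet_append_singleton]

-- ===== VERDICT (by name: the statement is the Claim_ definition above) =====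
theorem findDataLocations_spec : Claim_equal_findDataLocations := by
  intro locations movedFrom movedTo _
  unfold Spec_findDataLocations findDataLocations findDataLocations_alt
  have hmap : PySem.Dict.ofList (movedFrom.zip movedTo)
      = (movedFrom.zip movedTo).foldl (fun d p => d.insert p.1 p.2) PySem.Dict.empty := rfl
  rw [hmap]
  set m := (movedFrom.zip movedTo).foldl (fun d p => d.insert p.1 p.2) PySem.Dict.empty with hm
  show PySem.List.sorted
      (locations.foldl (fun acc val => acc ++ [walkA m PySem.Set.empty val]) []) (fun x => x) false
    = PySem.List.sorted
      ((locations.foldl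
        (fun (st : List Int × PySem.Dict Int Int) v =>
          let rc := resolve m st.2 v
          (st.1 ++ [rc.1], rc.2)) (([] : List Int), PySem.Dict.empty)).1) (fun x => x) false
  rw [PySem.List.foldl_append_singleton_eq_map, List.nil_append]
  rw [pvFold_correct m locations [] PySem.Dict.empty (by intro k hk; simp at hk), List.nil_append]
  have hmaps : List.map (walkA m PySem.Set.empty) locations = List.map (pvW m) locations :=
    List.map_congr_left fun val _ => pvWalk_eq m PySem.Set.empty val
  rw [hmaps]
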